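-- pv_equiv track=rewrite | github.com/zwvista/LogicPuzzlesAutomator | Puzzles/Parks/main.py | compress_colors_to_codes
-- ===== SOURCE A (Python) =====
-- def compress_colors_to_codes(color_matrix: list[list[tuple[int, int, int]]]) -> list[list[int]]:
--     """
--     将二维颜色数组中的颜色替换为数字代码。
--     第一种出现的颜色记作0，第二种记作1，以此类推。
--
--     参数:
--     color_matrix (list): 由 get_combined_pixel_colors 函数返回的二维颜色数组。
--
--     返回:
--     list: 一个二维列表，其中包含对应颜色的数字代码。
--     """
--     if not color_matrix:
--         return []
--
--     # 使用字典存储颜色到数字的映射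
--     color_to_code = {}
--     next_code = 0
--
--     # 创建新的二维数组来存储数字代码
--     coded_matrix = []
--
--     for row in color_matrix:
--         coded_row = []
--         for color in row:
--             # 如果颜色不在字典中，分配一个新的代码
--             if color not in color_to_code:
--                 color_to_code[color] = next_code
--                 next_code += 1
--
--             # 将颜色代码添加到行中
--             coded_row.append(color_to_code[color])
--         coded_matrix.append(coded_row)
--
--     return coded_matrix
-- ===== SOURCE B (Python) =====
-- def compress_colors_to_codes(color_matrix: list[list[tuple[int, int, int]]]) -> list[list[int]]:
--     if not color_matrix:
--         return []
--     # Rank-by-first-occurrence: record each color's first index in the flattened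
--     # matrix (reverse scan, so the earliest write wins), sort the distinct colors
--     # by that index, and the sort rank is the code.
--     flat = [c for row in color_matrix for c in row]
--     first = {}
--     for i, c in reversed(list(enumerate(flat))):
--         first[c] = i
--     order = sorted(first, key=first.get)
--     code = {c: k for k, c in enumerate(order)}
--     return [[code[c] for c in row] for row in color_matrix]
-- ===== Notes on version B (the rewrite author's own statement) =====
-- stated objective: alternative
-- what changed: A assigns codes lazily with a stateful counter while writing the output; B is a rank-by-first-occurrence algorithm: it records each distinct color's first index in the flattened matrix via a reverse overwrite scan, sorts the distinct colors by that index, and uses the sort rank as the code.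
import Mathlib
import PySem

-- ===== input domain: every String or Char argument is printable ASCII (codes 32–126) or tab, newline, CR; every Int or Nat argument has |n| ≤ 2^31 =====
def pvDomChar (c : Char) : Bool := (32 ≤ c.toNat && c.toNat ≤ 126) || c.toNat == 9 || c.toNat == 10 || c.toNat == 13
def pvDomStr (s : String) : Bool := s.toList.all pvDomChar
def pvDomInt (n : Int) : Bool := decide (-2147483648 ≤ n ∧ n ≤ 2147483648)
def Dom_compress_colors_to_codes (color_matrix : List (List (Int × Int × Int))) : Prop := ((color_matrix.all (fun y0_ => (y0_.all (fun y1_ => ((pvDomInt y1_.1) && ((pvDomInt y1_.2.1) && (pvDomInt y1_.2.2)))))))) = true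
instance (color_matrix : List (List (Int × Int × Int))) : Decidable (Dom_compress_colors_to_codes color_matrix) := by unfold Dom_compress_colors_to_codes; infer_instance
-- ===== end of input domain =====

-- B replaces A's stateful lazy-assign pass by a rank-by-first-occurrence algorithm
-- (reverse overwrite scan records first indices, sort the distinct colors by first
-- index, the sort rank is the code); objective: alternative algorithm, similar cost.

-- ===== PORT A =====
-- inner loop body: 'if color not in color_to_code: …' then append color_to_code[color]
-- (the lookup after the insert always succeeds, so getD 0 is exact)
def pvStepColor (s : PySem.Dict (Int × Int × Int) Int × Int × List Int)
    (color : Int × Int × Int) : PySem.Dict (Int × Int × Int) Int × Int × List Int :=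
  let s1 := if s.1.contains color then s else (s.1.insert color s.2.1, s.2.1 + 1, s.2.2)
  (s1.1, s1.2.1, s1.2.2 ++ [s1.1.getD color 0])

def pvStepRow (st : PySem.Dict (Int × Int × Int) Int × Int × List (List Int))
    (row : List (Int × Int × Int)) :
    PySem.Dict (Int × Int × Int) Int × Int × List (List Int) :=
  let inner := row.foldl pvStepColor (st.1, st.2.1, ([] : List Int))
  (inner.1, inner.2.1, st.2.2 ++ [inner.2.2])

def compress_colors_to_codes (color_matrix : List (List (Int × Int × Int))) : List (List Int) :=
  if color_matrix = [] then []
  else (color_matrix.foldl pvStepRow (PySem.Dict.empty, 0, ([] : List (List Int)))).2.2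

-- ===== PORT B =====
-- 'for i, c in reversed(list(enumerate(flat))): first[c] = i'
def pvFirstDict (flat : List (Int × Int × Int)) : PySem.Dict (Int × Int × Int) Int :=
  ((PySem.List.enumerate flat).reverse).foldl (fun d p => d.insert p.2 p.1) PySem.Dict.empty

-- 'code = {c: k for k, c in enumerate(order)}'
def pvCodesOf (u : List (Int × Int × Int)) : PySem.Dict (Int × Int × Int) Int :=
  (PySem.List.enumerate u).foldl (fun d p => d.insert p.2 p.1) PySem.Dict.empty

-- first.get / code[c] never miss (every key is present), so getD 0 is exact
def compress_colors_to_codes_alt (color_matrix : List (List (Int × Int × Int))) : List (List Int) :=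
  if color_matrix = [] then []
  else
    let flat := color_matrix.flatMap (fun row => row)
    let first := pvFirstDict flat
    let order := PySem.List.sorted first.keys (fun c => first.getD c 0)
    let code := pvCodesOf order
    color_matrix.map (fun row => row.map (fun c => code.getD c 0))

-- ===== PRECONDITION & SPEC =====
def Spec_compress_colors_to_codes (color_matrix : List (List (Int × Int × Int))) (out : List (List Int)) : Prop := out = compress_colors_to_codes_alt color_matrix
instance (color_matrix : List (List (Int × Int × Int))) (out : List (List Int)) : Decidable (Spec_compress_colors_to_codes color_matrix out) := by unfold Spec_compress_colors_to_codes; infer_instance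

-- ===== CLAIM (what is proved, stated in full; the proofs are below) =====
def Claim_equal_compress_colors_to_codes : Prop := ∀ (color_matrix : List (List (Int × Int × Int))), Dom_compress_colors_to_codes color_matrix → Spec_compress_colors_to_codes color_matrix (compress_colors_to_codes color_matrix)

-- ===== LEMMAS AND PROOFS =====

-- B's code table sends the element at index i of a duplicate-free list to i.
theorem pvCodesOf_getD (u : List (Int × Int × Int)) (hu : u.Nodup)
    (i : Nat) (hi : i < u.length) :
    (pvCodesOf u).getD u[i] 0 = (i : Int) := by
  have hitems : (pvCodesOf u).items =
      (PySem.List.enumerate u).map (fun p => (p.2, p.1)) := by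
    have := PySem.Dict.items_foldl_insert_fresh (l := PySem.List.enumerate u)
      (k := fun p => p.2) (v := fun p => p.1) (d := PySem.Dict.empty)
      (by intro a _; simp [PySem.Dict.contains_empty])
      (by simpa [PySem.List.map_snd_enumerate] using hu)
    simpa [PySem.Dict.items] using this
  have hmem : ((u[i], (i : Int)) : (Int × Int × Int) × Int) ∈ (pvCodesOf u).items := by
    rw [hitems]
    simp only [List.mem_map]
    exact ⟨((i : Int), u[i]), by rw [PySem.List.mem_enumerate_iff]; exact ⟨i, hi, by simp⟩, rfl⟩
  have hkeys : (pvCodesOf u).keys.Nodup := by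
    have h2 : (pvCodesOf u).keys = u := by
      simp only [PySem.Dict.keys, hitems, List.map_map]
      exact PySem.List.map_snd_enumerate u 0
    rw [h2]; exact hu
  exact PySem.Dict.getD_of_mem_items _ hmem hkeys 0

-- a set only grows at the back under update
theorem pvUpdate_prefix : ∀ (q s : List (Int × Int × Int)), s <+: PySem.Set.update s q := by
  intro q
  induction q with
  | nil => intro s; simp [PySem.Set.update]
  | cons x q ih =>
    intro s
    have h1 : s <+: PySem.Set.add s x := by
      simp only [PySem.Set.add]; split <;> simp
    have h2 := ih (PySem.Set.add s x)
    have h3 : PySem.Set.update s (x :: q) = PySem.Set.update (PySem.Set.add s x) q := by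
      simp [PySem.Set.update]
    rw [h3]; exact h1.trans h2

-- dedup of a longer list extends dedup of a prefix.
theorem pvDedup_prefix (p q : List (Int × Int × Int)) :
    PySem.List.dedup p <+: PySem.List.dedup (p ++ q) := by
  have h : PySem.List.dedup (p ++ q) = PySem.Set.update (PySem.List.dedup p) q := by
    simp [PySem.List.dedup_eq_ofList, PySem.Set.ofList_eq_foldl, List.foldl_append,
      PySem.Set.update]
  rw [h]; exact pvUpdate_prefix q _

theorem pvDedup_append_mem (p : List (Int × Int × Int)) (c : Int × Int × Int)
    (hc : c ∈ p) : PySem.List.dedup (p ++ [c]) = PySem.List.dedup p := by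
  have h : PySem.List.dedup (p ++ [c]) = PySem.Set.add (PySem.List.dedup p) c := by
    simp [PySem.List.dedup_eq_ofList, PySem.Set.ofList_eq_foldl, List.foldl_append]
  rw [h]; simp [PySem.Set.add, PySem.Set.contains, hc]

theorem pvDedup_append_not_mem (p : List (Int × Int × Int)) (c : Int × Int × Int)
    (hc : c ∉ p) : PySem.List.dedup (p ++ [c]) = PySem.List.dedup p ++ [c] := by
  have h : PySem.List.dedup (p ++ [c]) = PySem.Set.add (PySem.List.dedup p) c := by
    simp [PySem.List.dedup_eq_ofList, PySem.Set.ofList_eq_foldl, List.foldl_append]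
  rw [h]; simp [PySem.Set.add, PySem.Set.contains, hc]

-- a reverse fold of overwriting inserts keeps, for each key, the FIRST pair of the list
theorem pvRevFold_getD (e : List (Int × (Int × Int × Int)))
    (d : PySem.Dict (Int × Int × Int) Int) (c : Int × Int × Int) :
    ((e.reverse.foldl (fun d p => d.insert p.2 p.1) d).getD c 0) =
      match e.find? (fun p => p.2 == c) with
      | some p => p.1
      | none => d.getD c 0 := by
  induction e with
  | nil => simp
  | cons p t ih =>
    have h : (p :: t).reverse = t.reverse ++ [p] := by simp
    rw [h, List.foldl_append]
    simp only [List.foldl_cons, List.foldl_nil, List.find?_cons]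
    by_cases hc : c = p.2
    · simp [hc]
    · rw [PySem.Dict.getD_insert_of_ne _ _ _ hc, ih]
      have : (p.2 == c) = false := by simp [Ne.symm hc]
      simp [this]

-- the first pair of enumerate holding c carries c's first index
theorem pvFind_enumerate (l : List (Int × Int × Int)) (s : Int) (c : Int × Int × Int)
    (hc : c ∈ l) :
    (PySem.List.enumerate l s).find? (fun p => p.2 == c) = some (s + (l.idxOf c : Int), c) := by
  induction l generalizing s with
  | nil => cases hc
  | cons x t ih =>
    rw [PySem.List.enumerate]
    by_cases hx : x = c
    · subst hx
      simp [List.idxOf_cons_self]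
    · have hct : c ∈ t := by cases hc with | head => exact absurd rfl hx | tail _ h => exact h
      have hbe : (x == c) = false := by simp [hx]
      rw [List.find?_cons]
      simp only [hbe]
      rw [ih (s + 1) hct]
      have : (x :: t).idxOf c = t.idxOf c + 1 := by
        rw [List.idxOf_cons]; simp [hbe]
      rw [this]
      congr 1
      push_cast
      ring_nf

theorem pvFirst_getD (flat : List (Int × Int × Int)) (c : Int × Int × Int) (hc : c ∈ flat) :
    (pvFirstDict flat).getD c 0 = (flat.idxOf c : Int) := by
  unfold pvFirstDict
  rw [pvRevFold_getD, pvFind_enumerate flat 0 c hc]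
  simp

theorem pvFirst_keys_perm (flat : List (Int × Int × Int)) :
    (pvFirstDict flat).keys.Perm (PySem.List.dedup flat) := by
  have hkeys : (pvFirstDict flat).keys =
      PySem.Set.update PySem.Dict.empty.keys ((PySem.List.enumerate flat).reverse.map (·.2)) :=
    PySem.Dict.keys_foldl_insert_key _ _ _ _
  have hmap : (PySem.List.enumerate flat).reverse.map (fun p => p.2) = flat.reverse := by
    rw [List.map_reverse, PySem.List.map_snd_enumerate]
  have hform : (pvFirstDict flat).keys = PySem.List.dedup flat.reverse := by
    rw [hkeys, hmap]
    simp [PySem.Dict.keys_empty, PySem.List.dedup_eq_ofList, PySem.Set.ofList_eq_foldl,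
      PySem.Set.update]
  rw [hform]
  rw [List.perm_ext_iff_of_nodup (PySem.List.nodup_dedup _) (PySem.List.nodup_dedup _)]
  intro a
  simp

-- the dedup list is ordered by first-occurrence index
theorem pvDedup_pairwise_idxOf (l : List (Int × Int × Int)) :
    (PySem.List.dedup l).Pairwise (fun a b => (l.idxOf a : Int) < (l.idxOf b : Int)) := by
  induction l using List.reverseRecOn with
  | nil => simp [PySem.List.dedup, PySem.Set.ofList_eq_foldl]
  | append_singleton l c ih =>
    by_cases hc : c ∈ l
    · rw [pvDedup_append_mem l c hc]
      refine ih.imp_of_mem ?_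
      intro a b ha hb h
      have ha' := (PySem.List.mem_dedup _ _).1 ha
      have hb' := (PySem.List.mem_dedup _ _).1 hb
      rwa [List.idxOf_append_of_mem ha', List.idxOf_append_of_mem hb']
    · rw [pvDedup_append_not_mem l c hc]
      rw [List.pairwise_append]
      refine ⟨?_, by simp, ?_⟩
      · refine ih.imp_of_mem ?_
        intro a b ha hb h
        have ha' := (PySem.List.mem_dedup _ _).1 ha
        have hb' := (PySem.List.mem_dedup _ _).1 hb
        rwa [List.idxOf_append_of_mem ha', List.idxOf_append_of_mem hb']
      · intro a ha b hb
        have ha' := (PySem.List.mem_dedup _ _).1 ha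
        have hb' : b = c := by simpa using hb
        subst hb'
        rw [List.idxOf_append_of_mem ha']
        have h1 : l.idxOf a < l.length := List.idxOf_lt_length_of_mem ha'
        have h2 : (l ++ [b]).idxOf b = l.length := by
          rw [List.idxOf_append, if_neg hc]; simp
        rw [h2]
        exact_mod_cast h1

-- sorting the recorded colors by first index reproduces the dedup order
theorem pvOrder_eq (flat : List (Int × Int × Int)) :
    PySem.List.sorted (pvFirstDict flat).keys (fun c => (pvFirstDict flat).getD c 0) =
      PySem.List.dedup flat := by
  apply PySem.List.sorted_eq_of_perm_of_pairwise_lt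
  · exact (pvFirst_keys_perm flat).symm
  · refine (pvDedup_pairwise_idxOf flat).imp_of_mem ?_
    intro a b ha hb h
    have ha' := (PySem.List.mem_dedup _ _).1 ha
    have hb' := (PySem.List.mem_dedup _ _).1 hb
    rwa [pvFirst_getD flat a ha', pvFirst_getD flat b hb']

-- Inner-loop invariant for A: folding the per-color step over a row extends the accumulator
-- by the codes of the row, and the dict stays the code-table restricted to seen colors.
theorem pvInner (F : List (Int × Int × Int)) :
    ∀ (row p rest : List (Int × Int × Int)) (d : PySem.Dict (Int × Int × Int) Int)
      (acc : List Int),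
      p ++ (row ++ rest) = F →
      d.keys = PySem.List.dedup p →
      (∀ c ∈ PySem.List.dedup p,
        d.getD c 0 = (pvCodesOf (PySem.List.dedup F)).getD c 0) →
      ∃ d' : PySem.Dict (Int × Int × Int) Int,
        row.foldl pvStepColor (d, ((PySem.List.dedup p).length : Int), acc) =
          (d', ((PySem.List.dedup (p ++ row)).length : Int),
            acc ++ row.map (fun c => (pvCodesOf (PySem.List.dedup F)).getD c 0)) ∧
        d'.keys = PySem.List.dedup (p ++ row) ∧
        (∀ c ∈ PySem.List.dedup (p ++ row),
          d'.getD c 0 = (pvCodesOf (PySem.List.dedup F)).getD c 0) := by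
  intro row
  induction row with
  | nil =>
    intro p rest d acc _ hkeys hvals
    exact ⟨d, by simp, by simpa using hkeys, by simpa using hvals⟩
  | cons c row ih =>
    intro p rest d acc hflat hkeys hvals
    have hmemkeys : d.contains c = true ↔ c ∈ PySem.List.dedup p := by
      rw [PySem.Dict.contains_iff_mem_keys, hkeys]
    by_cases hc : d.contains c = true
    · -- seen before: dict unchanged, code looked up
      have hcp : c ∈ p := (PySem.List.mem_dedup _ _).1 (hmemkeys.1 hc)
      have hstep : pvStepColor (d, ((PySem.List.dedup p).length : Int), acc) c =
          (d, ((PySem.List.dedup (p ++ [c])).length : Int),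
            acc ++ [(pvCodesOf (PySem.List.dedup F)).getD c 0]) := by
        rw [pvDedup_append_mem p c hcp, ← hvals c (hmemkeys.1 hc)]
        simp [pvStepColor, hc]
      have hflat' : (p ++ [c]) ++ (row ++ rest) = F := by simpa using hflat
      have hkeys' : d.keys = PySem.List.dedup (p ++ [c]) := by
        rw [pvDedup_append_mem p c hcp]; exact hkeys
      have hvals' : ∀ x ∈ PySem.List.dedup (p ++ [c]),
          d.getD x 0 = (pvCodesOf (PySem.List.dedup F)).getD x 0 := by
        rw [pvDedup_append_mem p c hcp]; exact hvals
      obtain ⟨d', heq, hk, hv⟩ := ih (p ++ [c]) rest d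
        (acc ++ [(pvCodesOf (PySem.List.dedup F)).getD c 0]) hflat' hkeys' hvals'
      refine ⟨d', ?_, ?_, ?_⟩
      · rw [List.foldl_cons, hstep, heq]; simp
      · simpa using hk
      · simpa using hv
    · -- new color: inserted with the next code, which is its index in the global dedup
      have hcp : c ∉ p := fun h => hc (hmemkeys.2 ((PySem.List.mem_dedup _ _).2 h))
      have hded : PySem.List.dedup (p ++ [c]) = PySem.List.dedup p ++ [c] :=
        pvDedup_append_not_mem p c hcp
      -- the fresh code equals the code table's code for c
      have hpref : PySem.List.dedup (p ++ [c]) <+: PySem.List.dedup F := by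
        have : (p ++ [c]) ++ (row ++ rest) = F := by simpa using hflat
        rw [← this]; exact pvDedup_prefix _ _
      obtain ⟨t, ht⟩ := hpref
      have hlen : (PySem.List.dedup p).length < (PySem.List.dedup F).length := by
        rw [← ht, hded]; simp
      have hget : (PySem.List.dedup F)[(PySem.List.dedup p).length]'hlen = c := by
        have hlen1 : (PySem.List.dedup p).length <
            (PySem.List.dedup (p ++ [c]) ++ t).length := by rw [ht]; exact hlen
        rw [← List.getElem_of_eq ht hlen1]
        rw [List.getElem_append_left (by rw [hded]; simp)]
        rw [List.getElem_of_eq hded (by rw [hded]; simp)]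
        simp
      have hcode : (pvCodesOf (PySem.List.dedup F)).getD c 0 =
          ((PySem.List.dedup p).length : Int) := by
        rw [← hget]
        exact pvCodesOf_getD _ (PySem.List.nodup_dedup F) _ hlen
      have hcontains : d.contains c = false := by
        cases h : d.contains c with
        | false => rfl
        | true => exact absurd h hc
      have hstep : pvStepColor (d, ((PySem.List.dedup p).length : Int), acc) c =
          (d.insert c ((PySem.List.dedup p).length : Int),
            ((PySem.List.dedup (p ++ [c])).length : Int),
            acc ++ [(pvCodesOf (PySem.List.dedup F)).getD c 0]) := by
        rw [hded, hcode]
        simp [pvStepColor, hcontains, PySem.Dict.getD_insert_self]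
      have hflat' : (p ++ [c]) ++ (row ++ rest) = F := by simpa using hflat
      have hkeys' : (d.insert c ((PySem.List.dedup p).length : Int)).keys =
          PySem.List.dedup (p ++ [c]) := by
        rw [PySem.Dict.keys_insert_of_not_contains _ _ hcontains, hkeys, hded]
      have hvals' : ∀ x ∈ PySem.List.dedup (p ++ [c]),
          (d.insert c ((PySem.List.dedup p).length : Int)).getD x 0 =
            (pvCodesOf (PySem.List.dedup F)).getD x 0 := by
        intro x hx
        rw [hded] at hx
        rcases List.mem_append.1 hx with hx | hx
        · have hxc : x ≠ c := fun h => hc (hmemkeys.2 (h ▸ hx))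
          rw [PySem.Dict.getD_insert_of_ne _ _ _ hxc]
          exact hvals x hx
        · have hxc : x = c := by simpa using hx
          subst hxc
          rw [PySem.Dict.getD_insert_self, hcode]
      obtain ⟨d', heq, hk, hv⟩ := ih (p ++ [c]) rest
        (d.insert c ((PySem.List.dedup p).length : Int))
        (acc ++ [(pvCodesOf (PySem.List.dedup F)).getD c 0]) hflat' hkeys' hvals'
      refine ⟨d', ?_, ?_, ?_⟩
      · rw [List.foldl_cons, hstep, heq]; simp
      · simpa using hk
      · simpa using hv

theorem pvOuter (F : List (Int × Int × Int)) :
    ∀ (rows : List (List (Int × Int × Int))) (p : List (Int × Int × Int))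
      (d : PySem.Dict (Int × Int × Int) Int) (acc : List (List Int)),
      p ++ rows.flatMap (fun row => row) = F →
      d.keys = PySem.List.dedup p →
      (∀ c ∈ PySem.List.dedup p,
        d.getD c 0 = (pvCodesOf (PySem.List.dedup F)).getD c 0) →
      (rows.foldl pvStepRow (d, ((PySem.List.dedup p).length : Int), acc)).2.2 =
        acc ++ rows.map (fun row =>
          row.map (fun c => (pvCodesOf (PySem.List.dedup F)).getD c 0)) := by
  intro rows
  induction rows with
  | nil => intro p d acc _ _ _; simp
  | cons row rows ih =>
    intro p d acc hflat hkeys hvals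
    have hflat1 : p ++ (row ++ rows.flatMap (fun r => r)) = F := by simpa using hflat
    obtain ⟨d', heq, hk, hv⟩ := pvInner F row p (rows.flatMap (fun r => r)) d [] hflat1 hkeys hvals
    have hstep : pvStepRow (d, ((PySem.List.dedup p).length : Int), acc) row =
        (d', ((PySem.List.dedup (p ++ row)).length : Int),
          acc ++ [row.map (fun c => (pvCodesOf (PySem.List.dedup F)).getD c 0)]) := by
      simp only [pvStepRow, heq, List.nil_append]
    have hflat2 : (p ++ row) ++ rows.flatMap (fun r => r) = F := by simpa using hflat
    rw [List.foldl_cons, hstep, ih (p ++ row) d' _ hflat2 hk hv]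
    simp

-- ===== VERDICT (by name: the statement is the Claim_ definition above) =====
theorem compress_colors_to_codes_spec : Claim_equal_compress_colors_to_codes := by
  intro m _
  unfold Spec_compress_colors_to_codes compress_colors_to_codes compress_colors_to_codes_alt
  by_cases hm : m = []
  · simp [hm]
  · simp only [hm, if_false]
    rw [pvOrder_eq (m.flatMap (fun row => row))]
    have h := pvOuter (m.flatMap (fun row => row)) m [] PySem.Dict.empty [] (by simp)
      (by simp [PySem.List.dedup, PySem.Set.ofList]) (by simp [PySem.List.dedup, PySem.Set.ofList])
    simpa [PySem.List.dedup, PySem.Set.ofList] using h
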